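-- pv_equiv track=rewrite | github.com/NicolaiCloess/ZigZag-Chiffre | Jägerzaun.py | bestimme_reihenfolge
-- ===== SOURCE A (Python) =====
-- def bestimme_reihenfolge(wort):
--     wort = wort.lower()
--     indizes = []
--     indizes_sorted = []
--     for c in wort:
--         indizes.append(ord(c))
--         indizes_sorted.append(ord(c))
--     indizes_sorted.sort()
--
--     reihenfolge = []
--     for i in range(len(wort)):
--         reihenfolge.append(indizes_sorted.index(indizes[i]))
--
--     return reihenfolge
-- ===== SOURCE B (Python) =====
-- def bestimme_reihenfolge(wort):
--     wort = wort.lower()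
--     counts = {}
--     for code in map(ord, wort):
--         counts[code] = counts.get(code, 0) + 1
--     rank = {}
--     total = 0
--     for code in sorted(counts):
--         rank[code] = total
--         total += counts[code]
--     return [rank[ord(c)] for c in wort]
-- ===== Notes on version B (the rewrite author's own statement) =====
-- stated objective: faster
-- what changed: Replaces A's sort of all n codes plus a linear .index scan per position with a code counter, one prefix-sum pass over the sorted distinct codes (first sorted index = number of strictly smaller codes), and an O(1) rank lookup per position.
import Mathlib
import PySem

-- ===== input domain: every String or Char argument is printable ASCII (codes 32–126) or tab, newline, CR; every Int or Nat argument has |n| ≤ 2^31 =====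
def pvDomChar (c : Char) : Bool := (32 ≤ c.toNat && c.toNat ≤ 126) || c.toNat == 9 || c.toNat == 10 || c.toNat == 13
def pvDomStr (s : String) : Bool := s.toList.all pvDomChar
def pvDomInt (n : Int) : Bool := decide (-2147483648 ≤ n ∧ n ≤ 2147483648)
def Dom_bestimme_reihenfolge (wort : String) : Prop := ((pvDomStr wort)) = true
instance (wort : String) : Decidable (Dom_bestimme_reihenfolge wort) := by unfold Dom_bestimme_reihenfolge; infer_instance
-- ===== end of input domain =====

-- B replaces A's sort of all codes + per-position linear .index scans by a code counter and one
-- prefix-sum pass over the sorted distinct codes (the first sorted index of a code is the number of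
-- strictly smaller codes), then a single lookup per position.

-- ===== PORT A =====
-- literal transliteration of Source A; `.index` can never raise here (the looked-up value is in the
-- sorted copy of the same list), so the `.getD 0` default of `index?` is never used.
def bestimme_reihenfolge (wort : String) : List Int :=
  let w := (PySem.Str.lower wort).toList
  let indizes := w.foldl (fun acc c => acc ++ [((c.toNat : Int))]) []
  let indizes_sorted := w.foldl (fun acc c => acc ++ [((c.toNat : Int))]) []
  let indizes_sorted := PySem.List.sorted indizes_sorted (fun x => x) false
  (PySem.List.pyRange 0 (indizes.length : Int) 1).foldl
    (fun acc i =>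
      acc ++ [(((PySem.List.index? indizes_sorted (PySem.List.pyGetD indizes i 0)).getD 0 : Nat) : Int)]) []

-- ===== PORT B =====
-- literal transliteration of Source B; `rank[ord(c)]`'s key is always a key of `rank` (every code of
-- `wort` is a key of `counts`), so Python's `d[k]` never raises and `getD _ 0` is exact here.
def bestimme_reihenfolge_alt (wort : String) : List Int :=
  let w := (PySem.Str.lower wort).toList
  let counts := (w.map (fun c => (c.toNat : Int))).foldl
      (fun d code => d.insert code (d.getD code 0 + 1)) PySem.Dict.empty
  let rt := (PySem.List.sorted counts.keys (fun x => x) false).foldl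
      (fun (p : PySem.Dict Int Int × Int) code => (p.1.insert code p.2, p.2 + counts.getD code 0))
      (PySem.Dict.empty, (0 : Int))
  w.map (fun c => rt.1.getD ((c.toNat : Int)) 0)

-- ===== PRECONDITION & SPEC =====
def Spec_bestimme_reihenfolge (wort : String) (out : List Int) : Prop := out = bestimme_reihenfolge_alt wort
instance (wort : String) (out : List Int) : Decidable (Spec_bestimme_reihenfolge wort out) := by unfold Spec_bestimme_reihenfolge; infer_instance

-- ===== CLAIM (what is proved, stated in full; the proofs are below) =====
def Claim_equal_bestimme_reihenfolge : Prop := ∀ (wort : String), Dom_bestimme_reihenfolge wort → Spec_bestimme_reihenfolge wort (bestimme_reihenfolge wort)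

-- ===== LEMMAS AND PROOFS =====

-- A side: the first index of x in a ≤-sorted list is the number of strictly smaller elements
lemma index?_sorted_eq_countP_lt (s : List Int) (hs : s.Pairwise (· ≤ ·)) (x : Int) (hx : x ∈ s) :
    PySem.List.index? s x = some (s.countP (fun y => decide (y < x))) := by
  induction s with
  | nil => cases hx
  | cons a t ih =>
    rcases List.pairwise_cons.mp hs with ⟨ha, ht⟩
    by_cases hax : a = x
    · subst hax
      rw [PySem.List.index?_cons_self]
      have h0 : t.countP (fun y => decide (y < a)) = 0 :=
        List.countP_eq_zero.mpr (fun y hy => by simpa using not_lt.mpr (ha y hy))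
      simp [h0]
    · have hxt : x ∈ t := by cases hx with
        | head => exact absurd rfl hax
        | tail _ h => exact h
      rw [PySem.List.index?_cons_of_ne t hax, ih ht hxt]
      have halt : a < x := lt_of_le_of_ne (ha x hxt) hax
      simp [halt, Nat.add_comm]

lemma countP_lt_sorted (l : List Int) (x : Int) :
    (PySem.List.sorted l (fun y => y) false).countP (fun y => decide (y < x))
      = l.countP (fun y => decide (y < x)) :=
  (PySem.List.sorted_perm l (fun y => y) false).countP_eq _

-- B side: the prefix-sum fold never touches a key it does not process
lemma rank_fold_notmem (g : Int → Int) (ks : List Int) :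
    ∀ (r : PySem.Dict Int Int) (t k : Int), k ∉ ks →
      (ks.foldl (fun p code => (p.1.insert code p.2, p.2 + g code)) (r, t)).1.getD k 0
        = r.getD k 0 := by
  induction ks with
  | nil => intro r t k _; rfl
  | cons a ks ih =>
    intro r t k hk
    simp only [List.foldl_cons]
    rw [ih _ _ _ (fun h => hk (List.mem_cons_of_mem a h))]
    exact PySem.Dict.getD_insert_of_ne _ _ _ (fun h => hk (h ▸ List.mem_cons_self))

-- B side: on a strictly increasing key list the fold assigns each key the running total so far,
-- i.e. t plus the g-sum over the strictly smaller processed keys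
lemma rank_fold_mem (g : Int → Int) (ks : List Int) :
    ∀ (r : PySem.Dict Int Int) (t k : Int), k ∈ ks → ks.Pairwise (· < ·) →
      (ks.foldl (fun p code => (p.1.insert code p.2, p.2 + g code)) (r, t)).1.getD k 0
        = t + ((ks.filter (fun x => decide (x < k))).map g).sum := by
  induction ks with
  | nil => intro r t k hk _; cases hk
  | cons a ks ih =>
    intro r t k hk hpw
    rcases List.pairwise_cons.mp hpw with ⟨ha, hks⟩
    simp only [List.foldl_cons]
    by_cases hak : k = a
    · subst hak
      have hnot : k ∉ ks := fun h => lt_irrefl k (ha k h)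
      rw [rank_fold_notmem g ks _ _ _ hnot]
      have hfil : (k :: ks).filter (fun x => decide (x < k)) = [] := by
        rw [List.filter_eq_nil_iff]
        intro b hb
        rcases List.mem_cons.mp hb with hb | hb
        · simp [hb]
        · simpa using not_lt.mpr (le_of_lt (ha b hb))
      rw [hfil, PySem.Dict.getD_insert_self]
      simp
    · have hk' : k ∈ ks := (List.mem_cons.mp hk).resolve_left hak
      have halt : a < k := ha k hk'
      rw [ih _ _ _ hk' hks]
      have hfil : (a :: ks).filter (fun x => decide (x < k))
          = a :: ks.filter (fun x => decide (x < k)) := by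
        simp [halt]
      rw [hfil, List.map_cons, List.sum_cons]
      ring

-- counting glue: a Nodup enumeration ks of l's elements turns countP into a sum of counts
lemma sum_toFinset_count (l : List Int) : ∑ a ∈ l.toFinset, l.count a = l.length := by
  simp

lemma sum_count_filter (l ks : List Int) (hnd : ks.Nodup) (hmem : ∀ x, x ∈ ks ↔ x ∈ l)
    (p : Int → Bool) :
    ((ks.filter p).map (fun k => l.count k)).sum = l.countP p := by
  rw [← List.sum_toFinset _ (hnd.filter p)]
  have hset : (ks.filter p).toFinset = (l.filter p).toFinset := by
    ext x; simp [hmem x]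
  rw [hset, List.countP_eq_length_filter, ← sum_toFinset_count (l.filter p)]
  refine Finset.sum_congr rfl (fun a ha => ?_)
  have hpa : p a = true := (List.mem_filter.mp (List.mem_toFinset.mp ha)).2
  exact (List.count_filter hpa).symm

lemma list_sum_natCast (l : List Nat) : (l.map (fun (n : Nat) => (n : Int))).sum = ((l.sum : Nat) : Int) := by
  induction l with
  | nil => rfl
  | cons a t ih => rw [List.map_cons, List.sum_cons, List.sum_cons, ih]; push_cast; ring

lemma sum_count_filter_int (l ks : List Int) (hnd : ks.Nodup) (hmem : ∀ x, x ∈ ks ↔ x ∈ l)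
    (p : Int → Bool) :
    ((ks.filter p).map (fun k => (l.count k : Int))).sum = (l.countP p : Int) := by
  calc ((ks.filter p).map (fun k => (l.count k : Int))).sum
      = (((ks.filter p).map (fun k => l.count k)).map (fun (n : Nat) => (n : Int))).sum :=
        congrArg List.sum (List.map_map (g := fun (n : Nat) => (n : Int))
          (f := fun k => l.count k) (l := ks.filter p)).symm
    _ = (((ks.filter p).map (fun k => l.count k)).sum : Int) := list_sum_natCast _
    _ = (l.countP p : Int) := by rw [sum_count_filter l ks hnd hmem p]

-- ===== VERDICT (by name: the statement is the Claim_ definition above) =====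
theorem bestimme_reihenfolge_spec : Claim_equal_bestimme_reihenfolge := by
  intro wort _
  unfold Spec_bestimme_reihenfolge bestimme_reihenfolge bestimme_reihenfolge_alt
  set w := (PySem.Str.lower wort).toList with hw
  simp only [PySem.List.foldl_append_singleton_eq_map, List.nil_append,
    PySem.Dict.foldl_insert_getD_add_one_eq_counter, PySem.Dict.keys_counter]
  set codes := w.map (fun c => (c.toNat : Int)) with hcodes
  have h1 := List.map_map
      (g := fun v => (((PySem.List.index? (PySem.List.sorted codes (fun x => x) false) v).getD 0 : Nat) : Int))
      (f := fun j => PySem.List.pyGetD codes j 0)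
      (l := PySem.List.pyRange 0 (codes.length : Int) 1)
  rw [PySem.List.map_pyGetD_pyRange_zero' codes 0] at h1
  rw [show (List.map
        (fun x => (((PySem.List.index? (PySem.List.sorted codes (fun x => x) false) (PySem.List.pyGetD codes x 0)).getD 0 : Nat) : Int))
        (PySem.List.pyRange 0 (codes.length : Int) 1)) =
      (List.map (fun v => (((PySem.List.index? (PySem.List.sorted codes (fun x => x) false) v).getD 0 : Nat) : Int)) codes)
    from h1.symm]
  rw [hcodes, List.map_map]
  apply List.map_congr_left
  intro c hc
  have hmemc : (c.toNat : Int) ∈ codes := List.mem_map.mpr ⟨c, hc, rfl⟩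
  -- the key lists
  have hkmem : ∀ x, x ∈ PySem.List.sorted (PySem.Set.ofList codes) (fun x => x) false ↔ x ∈ codes := by
    intro x
    rw [PySem.List.mem_sorted, PySem.Set.mem_ofList]
  have hknd : (PySem.List.sorted (PySem.Set.ofList codes) (fun x => x) false).Nodup :=
    (PySem.List.sorted_perm (PySem.Set.ofList codes) (fun x => x) false).nodup_iff.mpr
      (PySem.Set.nodup_ofList codes)
  have hkpw : (PySem.List.sorted (PySem.Set.ofList codes) (fun x => x) false).Pairwise (· < ·) :=
    PySem.List.sorted_ofList_pairwise_lt codes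
  -- A's element: first sorted index = count of strictly smaller codes
  have hA : PySem.List.index? (PySem.List.sorted codes (fun x => x) false) (c.toNat : Int)
      = some (codes.countP (fun y => decide (y < (c.toNat : Int)))) := by
    have hpw : (PySem.List.sorted codes (fun x => x) false).Pairwise (· ≤ ·) := by
      simpa using PySem.List.sorted_pairwise codes (fun x => x)
    have hmem' : (c.toNat : Int) ∈ PySem.List.sorted codes (fun x => x) false :=
      (PySem.List.mem_sorted _ _ _ _).mpr hmemc
    rw [index?_sorted_eq_countP_lt _ hpw _ hmem', countP_lt_sorted]
  -- B's element: the rank assigned by the prefix-sum fold is the same count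
  have hB := rank_fold_mem (fun code => (PySem.Dict.counter codes).getD code 0)
      (PySem.List.sorted (PySem.Set.ofList codes) (fun x => x) false)
      PySem.Dict.empty 0 (c.toNat : Int) ((hkmem _).mpr hmemc) hkpw
  rw [hB]
  have hg : ∀ ks : List Int, ks.map (fun code => (PySem.Dict.counter codes).getD code 0)
      = ks.map (fun k => ((codes.count k : Nat) : Int)) :=
    fun ks => List.map_congr_left (fun k _ => PySem.Dict.getD_counter codes k)
  rw [hg, sum_count_filter_int codes _ hknd hkmem]
  show (((PySem.List.index? (PySem.List.sorted codes (fun x => x) false) ((c.toNat : Int))).getD 0 : Nat) : Int)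
      = 0 + ((List.countP (fun x => decide (x < (c.toNat : Int))) codes : Nat) : Int)
  rw [hA]
  simp
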